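-- pv_equiv track=rewrite | github.com/ksumini/Algorithm-Study2.0 | Programmers/주사위 고르기/jisu.py | get_wins_cnt
-- ===== SOURCE A (Python) =====
-- from typing import List, Set
--
-- def get_wins_cnt(A: List[int], B: List[int]) -> int:
--     """
--     모든 주사위 점수의 합에 따른 승리 횟수 반환(이분탐색 활용)
--     """
--     result = 0
--
--     A.sort()
--     B.sort()
--
--     for a in A:
--         # B 리스트에 대한 a의 lower bound(찾고자 하는 값 이상이 처음 나타나는 위치)
--         # = a가 몇 개의 경우의 수를 이기는지 개수
--         start, end = 0, len(B) - 1
--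
--         while start <= end:
--             mid = (start + end) // 2
--             if a > B[mid]:
--                 start = mid + 1
--             else:
--                 end = mid - 1
--
--         result += end
--
--     return result
-- ===== SOURCE B (Python) =====
-- def get_wins_cnt(A, B):
--     A.sort()
--     B.sort()
--     result = 0
--     j = 0
--     for a in A:
--         while j < len(B) and B[j] < a:
--             j += 1
--         result += j - 1
--     return result
-- ===== Notes on version B (the rewrite author's own statement) =====
-- stated objective: faster
-- what changed: replaces the per-element binary search over B with a single two-pointer forward merge over the two sorted lists (one index into B advanced monotonically), keeping the same in-place sorts and the same lower_bound-1 contribution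
import Mathlib
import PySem

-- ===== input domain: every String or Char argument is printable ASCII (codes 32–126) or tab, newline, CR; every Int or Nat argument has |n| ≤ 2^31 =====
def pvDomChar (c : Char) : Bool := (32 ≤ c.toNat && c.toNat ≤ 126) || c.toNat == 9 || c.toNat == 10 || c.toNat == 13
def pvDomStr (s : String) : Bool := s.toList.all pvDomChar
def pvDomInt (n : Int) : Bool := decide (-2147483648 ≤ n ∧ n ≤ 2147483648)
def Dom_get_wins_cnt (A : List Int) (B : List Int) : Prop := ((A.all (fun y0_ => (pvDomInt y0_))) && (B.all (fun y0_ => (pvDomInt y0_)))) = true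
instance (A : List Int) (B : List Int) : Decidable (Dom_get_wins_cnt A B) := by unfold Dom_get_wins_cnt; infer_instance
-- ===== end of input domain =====

-- B replaces A's per-element binary search over sorted B with a single two-pointer merge.
-- Both Pythons mutate their arguments the same way (A.sort(); B.sort()); the equivalence
-- proved here is about the return value.

-- ===== PORT A =====
-- the Python 'while start <= end' binary-search loop; returns the final 'end'.
-- fuel only makes the recursion structural: the interval shrinks each iteration, so
-- any fuel ≥ the initial interval length (we pass len B at the call site) is never exhausted.
def bsLoop (a : Int) (B : List Int) : Nat → Int → Int → Int
  | 0, _, e => e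
  | fuel + 1, start, e =>
    if start ≤ e then
      let mid := PySem.Int.floordiv (start + e) 2
      match PySem.List.pyGet? B mid with
      | some bm => if bm < a then bsLoop a B fuel (mid + 1) e else bsLoop a B fuel start (mid - 1)
      | none => e   -- IndexError in Python; unreachable from the initial call (0 ≤ start, e < len B)
    else e

def get_wins_cnt (A : List Int) (B : List Int) : Int :=
  let As := PySem.List.sorted A (fun x => x) false
  let Bs := PySem.List.sorted B (fun x => x) false
  As.foldl (fun result a => result + bsLoop a Bs Bs.length 0 ((Bs.length : Int) - 1)) 0

-- ===== PORT B =====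
-- the Python 'while j < len(B) and B[j] < a' loop; returns the final j.
-- fuel only makes the recursion structural: j increases each iteration and stays < len B,
-- so fuel = len B (passed at each call site) is never exhausted.
def advLoop (a : Int) (B : List Int) : Nat → Int → Int
  | 0, j => j
  | fuel + 1, j =>
    if j < (B.length : Int) then
      match PySem.List.pyGet? B j with
      | some bj => if bj < a then advLoop a B fuel (j + 1) else j
      | none => j   -- IndexError in Python; unreachable from the initial call (0 ≤ j)
    else j

def get_wins_cnt_alt (A : List Int) (B : List Int) : Int :=
  let As := PySem.List.sorted A (fun x => x) false
  let Bs := PySem.List.sorted B (fun x => x) false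
  (As.foldl (fun (st : Int × Int) a =>
      let j := advLoop a Bs Bs.length st.1
      (j, st.2 + (j - 1))) ((0 : Int), (0 : Int))).2

-- ===== PRECONDITION & SPEC =====
def Spec_get_wins_cnt (A : List Int) (B : List Int) (out : Int) : Prop := out = get_wins_cnt_alt A B
instance (A : List Int) (B : List Int) (out : Int) : Decidable (Spec_get_wins_cnt A B out) := by unfold Spec_get_wins_cnt; infer_instance

-- ===== CLAIM (what is proved, stated in full; the proofs are below) =====
def Claim_equal_get_wins_cnt : Prop := ∀ (A : List Int) (B : List Int), Dom_get_wins_cnt A B → Spec_get_wins_cnt A B (get_wins_cnt A B)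

-- ===== LEMMAS AND PROOFS =====

-- number of elements of l below a
def cntLt (l : List Int) (a : Int) : Int := (l.countP (fun b => decide (b < a)) : Int)

theorem cntLt_nonneg (l : List Int) (a : Int) : 0 ≤ cntLt l a := by
  simp [cntLt]

theorem cntLt_le_length (l : List Int) (a : Int) : cntLt l a ≤ (l.length : Int) := by
  simp [cntLt]
  exact_mod_cast List.countP_le_length

theorem cntLt_mono (l : List Int) {a a' : Int} (h : a ≤ a') : cntLt l a ≤ cntLt l a' := by
  simp only [cntLt, Int.ofNat_le]
  exact List.countP_mono_left (fun x _ hx => by simp at hx ⊢; omega)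

-- on a sorted list, an element is < a iff its index is below the count of elements < a
theorem idx_lt_iff (l : List Int) (hp : l.Pairwise (· ≤ ·)) (a : Int) (i : Nat) (h : i < l.length) :
    l[i] < a ↔ (i : Int) < cntLt l a := by
  induction l generalizing i with
  | nil => simp at h
  | cons b t ih =>
    rcases List.pairwise_cons.mp hp with ⟨hb, ht⟩
    by_cases hba : b < a
    · cases i with
      | zero =>
        simp only [List.getElem_cons_zero, cntLt, List.countP_cons]
        simp [hba]
      | succ k =>
        simp only [List.getElem_cons_succ]
        have := ih ht k (by simpa using h)
        simp only [cntLt, List.countP_cons] at this ⊢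
        simp only [hba, decide_true, if_pos] at *
        push_cast at this ⊢
        omega
    · have hzero : t.countP (fun b => decide (b < a)) = 0 := by
        apply List.countP_eq_zero.mpr
        intro x hx
        have := hb x hx
        simp; omega
      cases i with
      | zero =>
        simp only [List.getElem_cons_zero, cntLt, List.countP_cons, hzero]
        simp [hba]
      | succ k =>
        simp only [List.getElem_cons_succ, cntLt, List.countP_cons, hzero]
        have hk : k < t.length := by simpa using h
        have : b ≤ t[k] := hb _ (List.getElem_mem hk)
        simp [hba]
        omega

theorem bs_correct (l : List Int) (hp : l.Pairwise (· ≤ ·)) (a : Int) :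
    ∀ (fuel : Nat) (start e : Int), (e + 1 - start).toNat ≤ fuel → 0 ≤ start →
      e < (l.length : Int) → start ≤ cntLt l a → cntLt l a ≤ e + 1 →
      bsLoop a l fuel start e = cntLt l a - 1 := by
  intro fuel
  induction fuel with
  | zero =>
    intro start e hf h0 helen hsc hce
    simp only [bsLoop]
    omega
  | succ n ih =>
    intro start e hf h0 helen hsc hce
    by_cases hse : start ≤ e
    · have hmid := PySem.Int.floordiv_two_mid_bounds hse
      set mid := PySem.Int.floordiv (start + e) 2 with hmiddef
      have hmidn : mid = ((mid.toNat : Nat) : Int) := by omega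
      have hlen : mid.toNat < l.length := by omega
      have hget : PySem.List.pyGet? l mid = some l[mid.toNat] := by
        conv_lhs => rw [hmidn, PySem.List.pyGet?_natCast]
        exact List.getElem?_eq_getElem hlen
      simp only [bsLoop, if_pos hse, ← hmiddef, hget]
      by_cases hlt : l[mid.toNat] < a
      · have := (idx_lt_iff l hp a mid.toNat hlen).mp hlt
        rw [if_pos hlt]
        exact ih (mid + 1) e (by omega) (by omega) helen (by omega) hce
      · have hnot : ¬ ((mid.toNat : Int) < cntLt l a) := fun hc =>
          hlt ((idx_lt_iff l hp a mid.toNat hlen).mpr hc)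
        rw [if_neg hlt]
        exact ih start (mid - 1) (by omega) h0 (by omega) hsc (by omega)
    · simp only [bsLoop, if_neg hse]
      omega

theorem adv_correct (l : List Int) (hp : l.Pairwise (· ≤ ·)) (a : Int) :
    ∀ (fuel : Nat) (j : Int), (cntLt l a - j).toNat ≤ fuel → 0 ≤ j → j ≤ cntLt l a →
      advLoop a l fuel j = cntLt l a := by
  intro fuel
  induction fuel with
  | zero =>
    intro j hf h0 hjc
    simp only [advLoop]
    omega
  | succ n ih =>
    intro j hf h0 hjc
    by_cases hjl : j < (l.length : Int)
    · have hlen : j.toNat < l.length := by omega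
      have hjn : j = ((j.toNat : Nat) : Int) := by omega
      have hget : PySem.List.pyGet? l j = some l[j.toNat] := by
        conv_lhs => rw [hjn, PySem.List.pyGet?_natCast]
        exact List.getElem?_eq_getElem hlen
      simp only [advLoop, if_pos hjl, hget]
      by_cases hlt : l[j.toNat] < a
      · have := (idx_lt_iff l hp a j.toNat hlen).mp hlt
        rw [if_pos hlt]
        exact ih (j + 1) (by omega) (by omega) (by omega)
      · have hnot : ¬ ((j.toNat : Int) < cntLt l a) := fun hc =>
          hlt ((idx_lt_iff l hp a j.toNat hlen).mpr hc)
        rw [if_neg hlt]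
        omega
    · simp only [advLoop, if_neg hjl]
      have := cntLt_le_length l a
      omega

-- the two-pointer fold computes the same running sum as summing (cntLt Bs a - 1)
theorem alt_fold_eq (Bs : List Int) (hB : Bs.Pairwise (· ≤ ·)) :
    ∀ (As : List Int), As.Pairwise (· ≤ ·) → ∀ (j r : Int), 0 ≤ j →
      (∀ a ∈ As, j ≤ cntLt Bs a) →
      (As.foldl (fun (st : Int × Int) a =>
          let j' := advLoop a Bs Bs.length st.1
          (j', st.2 + (j' - 1))) (j, r)).2
        = As.foldl (fun result a => result + (cntLt Bs a - 1)) r := by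
  intro As
  induction As with
  | nil => intro _ j r _ _; simp
  | cons a t ih =>
    intro hpA j r hj hle
    rcases List.pairwise_cons.mp hpA with ⟨ha, htp⟩
    have hadv : advLoop a Bs Bs.length j = cntLt Bs a :=
      adv_correct Bs hB a Bs.length j
        (by have := cntLt_le_length Bs a; omega) hj (hle a (by simp))
    simp only [List.foldl_cons, hadv]
    exact ih htp (cntLt Bs a) (r + (cntLt Bs a - 1)) (cntLt_nonneg _ _)
      (fun a' ha' => cntLt_mono Bs (ha a' ha'))

-- A's fold computes the same sum, pointwise via bs_correct
theorem a_fold_eq (Bs : List Int) (hB : Bs.Pairwise (· ≤ ·)) (As : List Int) (r : Int) :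
    As.foldl (fun result a => result + bsLoop a Bs Bs.length 0 ((Bs.length : Int) - 1)) r
      = As.foldl (fun result a => result + (cntLt Bs a - 1)) r := by
  induction As generalizing r with
  | nil => simp
  | cons a t ih =>
    have hbs : bsLoop a Bs Bs.length 0 ((Bs.length : Int) - 1) = cntLt Bs a - 1 :=
      bs_correct Bs hB a Bs.length 0 ((Bs.length : Int) - 1) (by omega) (by omega)
        (by omega) (cntLt_nonneg _ _) (by have := cntLt_le_length Bs a; omega)
    simp only [List.foldl_cons, hbs, ih]

-- ===== VERDICT (by name: the statement is the Claim_ definition above) =====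
theorem get_wins_cnt_spec : Claim_equal_get_wins_cnt := by
  intro A B _
  unfold Spec_get_wins_cnt get_wins_cnt get_wins_cnt_alt
  have hB : (PySem.List.sorted B (fun x => x) false).Pairwise (· ≤ ·) :=
    PySem.List.sorted_pairwise B (fun x => x)
  have hA : (PySem.List.sorted A (fun x => x) false).Pairwise (· ≤ ·) :=
    PySem.List.sorted_pairwise A (fun x => x)
  rw [a_fold_eq _ hB _ 0,
      alt_fold_eq _ hB _ hA 0 0 (by omega) (fun a _ => cntLt_nonneg _ _)]
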